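-- pv_equiv track=rewrite | github.com/SpartaStudy/SpartaStudy | Algorithm/2024.01/wolfy916/LED 전구 버튼.py | solution
-- ===== SOURCE A (Python) =====
-- def solution(N, B, bulbs):
--     visited = [bulbs[:]]  # 반복 구간 탐지를 위한 기록용 리스트
--     start = end = 0       # 반복 구간의 시작과 끝 인덱스를 기록할 변수
--     loop_cnt = B          # 남은 스위치 사용 횟수
--     for i in range(1, B + 1):
--         # [1] 시뮬레이션
--         bulbs = [0] * N
--         bulbs[0] = (visited[-1][0] + visited[-1][-1]) % 2
--         for j in range(1, N):
--             bulbs[j] = (visited[-1][j] + visited[-1][j - 1]) % 2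
--         # [2] 반복 구간 발견
--         if bulbs in visited:
--             start, end = visited.index(bulbs), i
--             loop_cnt -= i
--             break
--         # [3] 기록
--         visited.append(bulbs[:])
--     else:
--         # [4-1] 반복 구간이 없을때
--         return visited[-1]
--
--     # [4-2] 반복 구간이 있을때
--     loop_lenV = end - start
--     idx = loop_cnt % loop_lenV + start
--     return visited[idx]
-- ===== SOURCE B (Python) =====
-- def solution(N, B, bulbs):
--     # The button is the linear map v -> v + (cyclic shift of v) over GF(2), i.e. I + C.
--     # Since (I + C)^(2^m) = I + C^(2^m) mod 2, state after B presses is computed by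
--     # binary decomposition of B: O(N log B) instead of step-by-step simulation.
--     if B <= 0:
--         return list(bulbs)
--     v = [(bulbs[j] + bulbs[j - 1]) % 2 for j in range(N)]  # one press (bulbs[-1] wraps)
--     e = B - 1
--     shift = 1
--     while e > 0:
--         if e % 2 == 1:
--             v = [(v[j] + v[(j - shift) % N]) % 2 for j in range(N)]
--         shift *= 2
--         e //= 2
--     return v
-- ===== Notes on version B (the rewrite author's own statement) =====
-- stated objective: faster
-- what changed: Instead of simulating each press and scanning a visited list for a repeated state, B uses that the press is the GF(2) linear map I+C (C a cyclic shift), so (I+C)^(2^m)=I+C^(2^m); it applies the B-th power by binary decomposition of B, XORing the vector with a rotated copy per set bit.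
import Mathlib
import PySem

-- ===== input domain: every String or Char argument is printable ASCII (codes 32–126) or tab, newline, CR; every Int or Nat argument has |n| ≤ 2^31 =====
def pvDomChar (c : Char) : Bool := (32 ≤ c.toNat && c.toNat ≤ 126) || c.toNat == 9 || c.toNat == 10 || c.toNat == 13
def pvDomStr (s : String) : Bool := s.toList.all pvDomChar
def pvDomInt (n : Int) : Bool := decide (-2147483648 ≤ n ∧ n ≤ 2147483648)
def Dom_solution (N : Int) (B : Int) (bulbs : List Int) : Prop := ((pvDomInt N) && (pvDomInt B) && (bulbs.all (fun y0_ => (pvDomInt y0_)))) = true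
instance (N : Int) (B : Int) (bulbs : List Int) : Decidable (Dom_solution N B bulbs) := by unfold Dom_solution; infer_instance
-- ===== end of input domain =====

-- B replaces A's step-by-step simulation with cycle detection by binary exponentiation of the
-- GF(2) linear press map (I + cyclic shift); objective: faster.

-- ===== PORT A =====
-- one press: bulbs = [0]*N; bulbs[0] = (prev[0]+prev[-1])%2; for j in range(1,N): bulbs[j] = (prev[j]+prev[j-1])%2
def pressA (N : Int) (prev : List Int) : List Int :=
  let b0 := List.replicate N.toNat 0
  let b1 := PySem.List.pySetD b0 0
      (PySem.Int.mod (PySem.List.pyGetD prev 0 0 + PySem.List.pyGetD prev (-1) 0) 2)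
  (PySem.List.pyRange 1 N 1).foldl
    (fun acc j => PySem.List.pySetD acc j
      (PySem.Int.mod (PySem.List.pyGetD prev j 0 + PySem.List.pyGetD prev (j - 1) 0) 2)) b1

-- the for-loop with break: returns the final visited list and (start, i) if a repeat was found
def loopA (B : Int) (N : Int) (visited : List (List Int)) (i : Int) :
    List (List Int) × Option (Int × Int) :=
  if B + 1 ≤ i then (visited, none)
  else
    let bulbs := pressA N (PySem.List.pyGetD visited (-1) [])
    if bulbs ∈ visited then
      (visited, some (((PySem.List.index? visited bulbs).getD 0 : Nat), i))
    else loopA B N (visited ++ [bulbs]) (i + 1)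
termination_by (B + 1 - i).toNat
decreasing_by omega

-- the code after the loop: for-else return, or the cycle arithmetic
def postA (B : Int) (r : List (List Int) × Option (Int × Int)) : List Int :=
  match r with
  | (vis, none) => PySem.List.pyGetD vis (-1) []
  | (vis, some (start, iEnd)) =>
      PySem.List.pyGetD vis (PySem.Int.mod (B - iEnd) (iEnd - start) + start) []

def solution (N : Int) (B : Int) (bulbs : List Int) : List Int :=
  postA B (loopA B N [bulbs] 1)

-- ===== PORT B =====
-- v = [(bulbs[j] + bulbs[j-1]) % 2 for j in range(N)]
def pressB (N : Int) (v : List Int) : List Int :=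
  (PySem.List.pyRange 0 N 1).map
    (fun j => PySem.Int.mod (PySem.List.pyGetD v j 0 + PySem.List.pyGetD v (j - 1) 0) 2)

-- v = [(v[j] + v[(j - shift) % N]) % 2 for j in range(N)]
def rotXor (N : Int) (shift : Int) (v : List Int) : List Int :=
  (PySem.List.pyRange 0 N 1).map
    (fun j => PySem.Int.mod
      (PySem.List.pyGetD v j 0 + PySem.List.pyGetD v (PySem.Int.mod (j - shift) N) 0) 2)

-- while e > 0: if e % 2 == 1: v = rotXor …; shift *= 2; e //= 2
def powLoop (N : Int) (e : Int) (shift : Int) (v : List Int) : List Int :=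
  if e ≤ 0 then v
  else
    let v' := if PySem.Int.mod e 2 = 1 then rotXor N shift v else v
    powLoop N (PySem.Int.floordiv e 2) (shift * 2) v'
termination_by e.toNat
decreasing_by
  rw [PySem.Int.floordiv_eq_ediv_of_pos (by omega)]; omega

def solution_alt (N : Int) (B : Int) (bulbs : List Int) : List Int :=
  if B ≤ 0 then bulbs
  else powLoop N (B - 1) 1 (pressB N bulbs)

-- ===== PRECONDITION & SPEC =====
-- Pre_ excludes exactly the inputs where Python A raises IndexError: B ≥ 1 with N ≤ 0
-- (assignment bulbs[0] on an empty list) or N > len(bulbs) (reading visited[-1][j], j < N).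
def Pre_solution (N : Int) (B : Int) (bulbs : List Int) : Prop :=
  B ≤ 0 ∨ (1 ≤ N ∧ N ≤ (bulbs.length : Int))
instance (N : Int) (B : Int) (bulbs : List Int) : Decidable (Pre_solution N B bulbs) := by
  unfold Pre_solution; infer_instance

def pvWitness_solution : Int × Int × List Int := (3, 5, [1, 0, 1])

def Spec_solution (N : Int) (B : Int) (bulbs : List Int) (out : List Int) : Prop :=
  out = solution_alt N B bulbs
instance (N : Int) (B : Int) (bulbs : List Int) (out : List Int) :
    Decidable (Spec_solution N B bulbs out) := by unfold Spec_solution; infer_instance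

-- ===== CLAIM (what is proved, stated in full; the proofs are below) =====
def Claim_equal_solution : Prop := ∀ (N : Int) (B : Int) (bulbs : List Int),
  Dom_solution N B bulbs → Pre_solution N B bulbs → Spec_solution N B bulbs (solution N B bulbs)

-- ===== LEMMAS AND PROOFS =====

theorem foldl_set_length (f : Int → Int) (a b : Int) (L : List Int) (ha : 0 ≤ a) :
    ((PySem.List.pyRange a b 1).foldl (fun acc j => PySem.List.pySetD acc j (f j)) L).length
      = L.length := by
  by_cases h : b ≤ a
  · rw [PySem.List.pyRange_one_eq_nil h]; rfl
  · rw [PySem.List.pyRange_one_cons (by omega), List.foldl_cons]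
    have := foldl_set_length f (a + 1) b (PySem.List.pySetD L a (f a)) (by omega)
    rw [this, PySem.List.pySetD_of_nonneg _ _ ha, List.length_set]
termination_by (b - a).toNat

theorem foldl_set_get (f : Int → Int) (a b : Int) (L : List Int) (ha : 0 ≤ a)
    (k : ℕ) (hk : k < L.length) :
    ((PySem.List.pyRange a b 1).foldl (fun acc j => PySem.List.pySetD acc j (f j)) L)[k]'(by
       rw [foldl_set_length f a b L ha]; exact hk)
      = if a ≤ (k : Int) ∧ (k : Int) < b then f k else L[k] := by
  by_cases h : b ≤ a
  · simp only [PySem.List.pyRange_one_eq_nil h, List.foldl_nil]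
    rw [if_neg (by omega)]
  · simp only [PySem.List.pyRange_one_cons (show a < b by omega), List.foldl_cons]
    have hlen : (PySem.List.pySetD L a (f a)).length = L.length := by
      rw [PySem.List.pySetD_of_nonneg _ _ ha, List.length_set]
    have ih := foldl_set_get f (a + 1) b (PySem.List.pySetD L a (f a)) (by omega) k
      (by rw [hlen]; exact hk)
    rw [ih]
    simp only [PySem.List.pySetD_of_nonneg _ _ ha]
    by_cases hka : (k : Int) = a
    · have ha2 : a.toNat = k := by omega
      rw [if_neg (by omega), if_pos (by omega)]
      subst ha2
      rw [List.getElem_set_self]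
      congr 1
      omega
    · rw [List.getElem_set_ne (by omega)]
      split_ifs <;> first | rfl | omega
termination_by (b - a).toNat

theorem pressB_length (N : Int) (v : List Int) : (pressB N v).length = N.toNat := by
  simp [pressB, PySem.List.length_pyRange_one]

theorem pressB_get (N : Int) (v : List Int) (k : ℕ) (hk : k < N.toNat) :
    (pressB N v)[k]'(by rw [pressB_length]; exact hk)
      = PySem.Int.mod (PySem.List.pyGetD v (k : Int) 0 + PySem.List.pyGetD v ((k : Int) - 1) 0) 2 := by
  simp only [pressB, List.getElem_map, PySem.List.getElem_pyRange_one, zero_add]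

theorem pressA_eq_pressB (N : Int) (prev : List Int) : pressA N prev = pressB N prev := by
  by_cases hN : N ≤ 0
  · have h0 : N.toNat = 0 := by omega
    rw [pressA, pressB]
    rw [PySem.List.pyRange_one_eq_nil (show N ≤ 0 by omega),
      PySem.List.pyRange_one_eq_nil (show N ≤ 1 by omega)]
    simp [h0, PySem.List.pySetD, PySem.List.pySet?, PySem.List.pyIdx?]
  · have hb1len : (PySem.List.pySetD (List.replicate N.toNat (0:Int)) 0
        (PySem.Int.mod (PySem.List.pyGetD prev 0 0 + PySem.List.pyGetD prev (-1) 0) 2)).length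
        = N.toNat := by
      rw [PySem.List.pySetD_of_nonneg _ _ (by omega), List.length_set, List.length_replicate]
    have hAlen : (pressA N prev).length = N.toNat := by
      rw [pressA]
      rw [foldl_set_length _ _ _ _ (by omega)]
      exact hb1len
    apply List.ext_getElem
    · rw [hAlen, pressB_length]
    · intro k hk1 hk2
      rw [hAlen] at hk1
      rw [pressB_get _ _ _ hk1]
      have : pressA N prev = (PySem.List.pyRange 1 N 1).foldl
          (fun acc j => PySem.List.pySetD acc j
            (PySem.Int.mod (PySem.List.pyGetD prev j 0 + PySem.List.pyGetD prev (j - 1) 0) 2))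
          (PySem.List.pySetD (List.replicate N.toNat (0:Int)) 0
            (PySem.Int.mod (PySem.List.pyGetD prev 0 0 + PySem.List.pyGetD prev (-1) 0) 2)) := rfl
      rw [List.getElem_of_eq this]
      rw [foldl_set_get _ _ _ _ (by omega) k (by rw [hb1len]; exact hk1)]
      by_cases hk0 : k = 0
      · subst hk0
        rw [if_neg (by omega)]
        norm_num [PySem.List.pySetD_of_nonneg _ _ (show (0:Int) ≤ 0 by omega),
          List.getElem_set_self]
      · rw [if_pos (by omega)]

theorem iterate_shift {α : Type} (f : α → α) (x : α) (a L : ℕ)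
    (h : f^[a] x = f^[a + L] x) (n : ℕ) (hn : a ≤ n) : f^[n] x = f^[n + L] x := by
  have e1 : f^[n] x = f^[n - a] (f^[a] x) := by
    rw [← Function.iterate_add_apply]; congr 1; omega
  have e2 : f^[n + L] x = f^[n - a] (f^[a + L] x) := by
    rw [← Function.iterate_add_apply]; congr 1; omega
  rw [e1, e2, h]

theorem iterate_period {α : Type} (f : α → α) (x : α) (a L : ℕ) (hL : 1 ≤ L)
    (h : f^[a] x = f^[a + L] x) (k : ℕ) : f^[a + k] x = f^[a + k % L] x := by
  by_cases hk : k < L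
  · rw [Nat.mod_eq_of_lt hk]
  · have h1 : f^[a + (k - L)] x = f^[a + (k - L) % L] x := iterate_period f x a L hL h (k - L)
    have h2 : f^[a + (k - L)] x = f^[a + (k - L) + L] x :=
      iterate_shift f x a L h (a + (k - L)) (by omega)
    rw [show a + k = a + (k - L) + L by omega, ← h2, h1,
      show (k - L) % L = k % L from by
        conv_rhs => rw [show k = (k - L) + L by omega, Nat.add_mod_right]]
termination_by k

theorem rotXor_length (N k : Int) (v : List Int) : (rotXor N k v).length = N.toNat := by
  simp [rotXor, PySem.List.length_pyRange_one]

theorem rotXor_get (N s : Int) (v : List Int) (k : ℕ) (hk : k < N.toNat) :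
    (rotXor N s v)[k]'(by rw [rotXor_length]; exact hk)
      = PySem.Int.mod (PySem.List.pyGetD v (k : Int) 0
          + PySem.List.pyGetD v (PySem.Int.mod ((k : Int) - s) N) 0) 2 := by
  simp only [rotXor, List.getElem_map, PySem.List.getElem_pyRange_one, zero_add]

theorem pressB_eq_rotXor_one (N : Int) (hN : 1 ≤ N) (v : List Int)
    (hv : v.length = N.toNat) : pressB N v = rotXor N 1 v := by
  apply List.ext_getElem
  · rw [pressB_length, rotXor_length]
  · intro k hk1 hk2
    rw [pressB_length] at hk1
    rw [pressB_get _ _ _ hk1, rotXor_get _ _ _ _ hk1]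
    congr 1
    congr 1
    by_cases hk0 : k = 0
    · subst hk0
      rw [show ((0:ℕ) : Int) - 1 = -1 by norm_num,
          PySem.Int.mod_eq_emod_of_pos (by omega)]
      rw [show (-1) % N = N - 1 from by
        rw [show (-1:Int) = (N - 1) - N by ring, Int.sub_emod_right,
          Int.emod_eq_of_lt (by omega) (by omega)]]
      rw [PySem.List.pyGetD_neg_one v 0 (by intro hnil; rw [hnil] at hv; simp at hv; omega),
        PySem.List.pyGetD_eq_getElem v 0 (by omega) (by omega)]
      rw [List.getLast_eq_getElem]
      congr 1
      omega
    · rw [PySem.Int.mod_eq_emod_of_pos (by omega),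
        show ((k:Int) - 1) % N = (k:Int) - 1 from Int.emod_eq_of_lt (by omega) (by omega)]

theorem rotXor_rotXor (N s : Int) (hN : 1 ≤ N) (v : List Int) :
    rotXor N s (rotXor N s v) = rotXor N (2 * s) v := by
  apply List.ext_getElem
  · rw [rotXor_length, rotXor_length]
  · intro k hk1 hk2
    rw [rotXor_length] at hk1
    rw [rotXor_get _ _ _ _ hk1, rotXor_get _ _ _ _ hk1]
    have hNpos : (0:Int) < N := by omega
    have hi1a : 0 ≤ PySem.Int.mod ((k:Int) - s) N := PySem.Int.mod_nonneg _ hNpos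
    have hi1b : PySem.Int.mod ((k:Int) - s) N < N := PySem.Int.mod_lt _ hNpos
    have hrlen : ((rotXor N s v).length : Int) = N := by rw [rotXor_length]; omega
    rw [PySem.List.pyGetD_eq_getElem _ _ (by omega) (by rw [hrlen]; omega),
        PySem.List.pyGetD_eq_getElem _ _ hi1a (by rw [hrlen]; omega)]
    rw [rotXor_get _ _ _ _ (by omega : (k:Int).toNat < N.toNat),
        rotXor_get _ _ _ _ (by omega : (PySem.Int.mod ((k:Int) - s) N).toNat < N.toNat)]
    have hc1 : (((k:Int).toNat : Int)) = (k : Int) := by omega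
    have hc2 : (((PySem.Int.mod ((k:Int) - s) N).toNat : Int)) = PySem.Int.mod ((k:Int) - s) N := by
      omega
    rw [hc1, hc2]
    have hsame : PySem.Int.mod (PySem.Int.mod ((k:Int) - s) N - s) N
        = PySem.Int.mod ((k:Int) - 2 * s) N := by
      rw [PySem.Int.mod_eq_emod_of_pos hNpos, PySem.Int.mod_eq_emod_of_pos hNpos,
        PySem.Int.mod_eq_emod_of_pos hNpos]
      conv_rhs => rw [show (k:Int) - 2 * s = ((k:Int) - s) - s by ring]
      rw [Int.sub_emod ((k:Int) - s) s, Int.sub_emod (((k:Int) - s) % N) s,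
        Int.emod_emod_of_dvd _ (dvd_refl N)]
    rw [hsame]
    generalize PySem.List.pyGetD v ((k:Int)) 0 = A
    generalize PySem.List.pyGetD v (PySem.Int.mod ((k:Int) - s) N) 0 = C
    generalize PySem.List.pyGetD v (PySem.Int.mod ((k:Int) - 2 * s) N) 0 = E
    rw [PySem.Int.mod_eq_emod_of_pos (by omega : (0:Int) < 2),
        PySem.Int.mod_eq_emod_of_pos (by omega : (0:Int) < 2),
        PySem.Int.mod_eq_emod_of_pos (by omega : (0:Int) < 2),
        PySem.Int.mod_eq_emod_of_pos (by omega : (0:Int) < 2)]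
    omega

theorem iterate_pressB_two_pow (N : Int) (hN : 1 ≤ N) (m : ℕ) (v : List Int)
    (hv : v.length = N.toNat) : (pressB N)^[2 ^ m] v = rotXor N (2 ^ m) v := by
  induction m generalizing v with
  | zero => simpa using pressB_eq_rotXor_one N hN v hv
  | succ m ih =>
    have h2 : 2 ^ (m + 1) = 2 ^ m + 2 ^ m := by ring
    rw [h2, Function.iterate_add_apply, ih _ hv, ih _ (rotXor_length N _ v),
      rotXor_rotXor N _ hN v]
    congr 1
    ring

theorem powLoop_spec (N : Int) (hN : 1 ≤ N) (e : Int) (he : 0 ≤ e) (m : ℕ) (v : List Int)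
    (hv : v.length = N.toNat) :
    powLoop N e (2 ^ m) v = (pressB N)^[e.toNat * 2 ^ m] v := by
  rw [powLoop]
  by_cases h0 : e ≤ 0
  · rw [if_pos h0]
    rw [show e.toNat = 0 by omega, Nat.zero_mul, Function.iterate_zero_apply]
  · rw [if_neg h0]
    have hdiv : PySem.Int.floordiv e 2 = e / 2 := PySem.Int.floordiv_eq_ediv_of_pos (by omega)
    have hq : 0 ≤ e / 2 := by omega
    have hql : (e / 2).toNat < e.toNat := by omega
    have hstep : (2:Int) ^ m * 2 = 2 ^ (m + 1) := by ring
    by_cases hodd : PySem.Int.mod e 2 = 1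
    · simp only [hodd, if_true, hdiv, hstep]
      rw [powLoop_spec N hN (e / 2) hq (m + 1) _ (rotXor_length N _ v)]
      rw [← iterate_pressB_two_pow N hN m v hv, ← Function.iterate_add_apply]
      congr 1
      have he2 : e.toNat = 2 * (e / 2).toNat + 1 := by
        rw [PySem.Int.mod_eq_emod_of_pos (by omega)] at hodd
        omega
      rw [he2, pow_succ]
      ring
    · simp only [hodd, if_false, hdiv, hstep]
      rw [powLoop_spec N hN (e / 2) hq (m + 1) _ hv]
      congr 1
      have he2 : e.toNat = 2 * (e / 2).toNat := by
        rw [PySem.Int.mod_eq_emod_of_pos (by omega)] at hodd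
        omega
      rw [he2, pow_succ]
      ring
termination_by e.toNat

theorem map_range_getElem (f : ℕ → List Int) (n k : ℕ) (hk : k < n) :
    ((List.range n).map f)[k]'(by simpa using hk) = f k := by
  simp

theorem getLast_map_range (f : ℕ → List Int) (n : ℕ)
    (h : (List.range n).map f ≠ []) : ((List.range n).map f).getLast h = f (n - 1) := by
  rw [List.getLast_eq_getElem]
  simp

theorem loopA_post (N : Int) (hN : 1 ≤ N) (bulbs : List Int) (b' : ℕ) (hb : 1 ≤ b')
    (i : ℕ) (h1 : 1 ≤ i) (h2 : i ≤ b' + 1) :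
    postA (b' : Int) (loopA (b' : Int) N
        ((List.range i).map (fun k => (pressB N)^[k] bulbs)) (i : Int))
      = (pressB N)^[b'] bulbs := by
  set f := pressB N with hf
  set vis := (List.range i).map (fun k => f^[k] bulbs) with hvis
  have hvlen : vis.length = i := by simp [hvis]
  have hvne : vis ≠ [] := by
    intro h
    rw [h] at hvlen
    simp at hvlen
    omega
  have hlast : PySem.List.pyGetD vis (-1) [] = f^[i - 1] bulbs := by
    rw [PySem.List.pyGetD_neg_one vis [] hvne]
    simp only [hvis]
    rw [getLast_map_range]
  rw [loopA]
  by_cases hend : (b' : Int) + 1 ≤ (i : Int)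
  · rw [if_pos hend]
    show PySem.List.pyGetD vis (-1) [] = f^[b'] bulbs
    rw [hlast]
    congr 1
    omega
  · rw [if_neg hend]
    have hpress : pressA N (PySem.List.pyGetD vis (-1) []) = f^[i] bulbs := by
      rw [pressA_eq_pressB, hlast]
      conv_rhs => rw [show i = (i - 1) + 1 by omega,
        Function.iterate_succ_apply' f (i - 1) bulbs]
    simp only [hpress]
    by_cases hmem : f^[i] bulbs ∈ vis
    · rw [if_pos hmem]
      obtain ⟨st, hst⟩ := Option.isSome_iff_exists.mp
        ((PySem.List.index?_isSome_iff vis (f^[i] bulbs)).mpr hmem)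
      obtain ⟨pre, suf, hdec, hprelen, -⟩ :=
        (PySem.List.index?_eq_some_iff vis (f^[i] bulbs) st).mp hst
      have hstlt : st < i := by
        have hpl : pre.length < vis.length := by
          rw [hdec]
          simp
        omega
      have hrep : f^[st] bulbs = f^[st + (i - st)] bulbs := by
        rw [show st + (i - st) = i by omega]
        have hA : vis[st]'(by omega) = f^[st] bulbs := by
          simp only [hvis]
          exact map_range_getElem _ _ _ hstlt
        have hB : vis[st]'(by omega) = f^[i] bulbs := by
          simp only [hdec]
          rw [List.getElem_append_right (by omega)]
          simp [hprelen]
        rw [← hA, hB]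
      have hib : i ≤ b' := by omega
      rw [hst]
      show PySem.List.pyGetD vis
          (PySem.Int.mod ((b' : Int) - (i : Int)) ((i : Int) - (st : Int)) + (st : Int)) []
        = f^[b'] bulbs
      have hc1 : (b' : Int) - (i : Int) = ((b' - i : ℕ) : Int) := by omega
      have hc2 : (i : Int) - (st : Int) = ((i - st : ℕ) : Int) := by omega
      rw [hc1, hc2, PySem.Int.mod_natCast]
      rw [show ((((b' - i) % (i - st) : ℕ) : Int) + (st : Int))
          = (((b' - i) % (i - st) + st : ℕ) : Int) by push_cast; ring]
      set idx : ℕ := (b' - i) % (i - st) + st with hidxdef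
      have hidxlt : idx < i := by
        have : (b' - i) % (i - st) < i - st := Nat.mod_lt _ (by omega)
        omega
      rw [PySem.List.pyGetD_natCast, List.getD_eq_getElem vis [] (by omega)]
      have hgidx : vis[idx]'(by omega) = f^[idx] bulbs := by
        simp only [hvis]
        exact map_range_getElem _ _ _ hidxlt
      rw [hgidx]
      have hper := iterate_period f bulbs st (i - st) (by omega) hrep (b' - st)
      rw [show st + (b' - st) = b' by omega] at hper
      rw [hper]
      congr 1
      have hsplit : b' - st = (b' - i) + (i - st) := by omega
      rw [hsplit, Nat.add_mod_right]
      omega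
    · rw [if_neg hmem]
      have hext : vis ++ [f^[i] bulbs] = (List.range (i + 1)).map (fun k => f^[k] bulbs) := by
        rw [hvis, List.range_succ, List.map_append]
        rfl
      have hcast : (i : Int) + 1 = ((i + 1 : ℕ) : Int) := by omega
      rw [hext, hcast]
      exact loopA_post N hN bulbs b' hb (i + 1) (by omega) (by omega)
termination_by b' + 1 - i

theorem solution_eq_alt (N : Int) (B : Int) (bulbs : List Int)
    (hpre : B ≤ 0 ∨ (1 ≤ N ∧ N ≤ (bulbs.length : Int))) :
    solution N B bulbs = solution_alt N B bulbs := by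
  unfold solution solution_alt
  by_cases hB : B ≤ 0
  · rw [if_pos hB, loopA, if_pos (by omega : B + 1 ≤ 1)]
    show PySem.List.pyGetD [bulbs] (-1) [] = bulbs
    rw [PySem.List.pyGetD_neg_one _ _ (by simp)]
    rfl
  · rw [if_neg hB]
    have hN : 1 ≤ N := by
      rcases hpre with h | h
      · omega
      · exact h.1
    have hBb : B = ((B.toNat : ℕ) : Int) := by omega
    rw [hBb]
    have hstart : [bulbs] = (List.range 1).map (fun k => (pressB N)^[k] bulbs) := by simp
    rw [show ((1:Int)) = ((1:ℕ) : Int) by norm_num] at *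
    rw [hstart]
    rw [loopA_post N hN bulbs B.toNat (by omega) 1 (by omega) (by omega)]
    rw [show ((1:ℕ) : Int) = 2 ^ (0:ℕ) by norm_num]
    rw [powLoop_spec N hN ((B.toNat : Int) - 2 ^ (0:ℕ)) (by omega) 0 (pressB N bulbs)
      (pressB_length N bulbs)]
    simp only [pow_zero, Nat.mul_one]
    rw [← Function.iterate_succ_apply]
    congr 1
    omega

-- ===== VERDICT (by name: the statement is the Claim_ definition above) =====
theorem solution_spec : Claim_equal_solution := by
  intro N B bulbs _ hpre
  unfold Pre_solution at hpre
  unfold Spec_solution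
  exact solution_eq_alt N B bulbs hpre
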